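-- pv_equiv track=rewrite | github.com/bcgov/cas-registration | bc_obps/common/management/commands/generate_e2e_fixture_dump.py | _clean_pg_dump_output
-- ===== SOURCE A (Python) =====
-- def _clean_pg_dump_output(raw_output):
--     """Remove comments, collapse blank lines, and sort INSERTs for deterministic output.
--
--     pg_dump doesn't guarantee row ordering within tables, so the same data
--     can produce different output on different machines. Sorting INSERT lines
--     makes the dump reproducible across environments.
--     """
--     lines = [line for line in raw_output.splitlines() if not line.startswith("--")]
--     collapsed = [line for i, line in enumerate(lines) if line.strip() or (i > 0 and lines[i - 1].strip())]
--
--     # Sort INSERT statements so output is deterministic regardless of DB physical storage order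
--     insert_lines = sorted(line for line in collapsed if line.startswith("INSERT INTO"))
--     result = []
--     inserts_placed = False
--     for line in collapsed:
--         if line.startswith("INSERT INTO"):
--             if not inserts_placed:
--                 result.extend(insert_lines)
--                 inserts_placed = True
--         else:
--             result.append(line)
--     return "\n".join(result)
-- ===== SOURCE B (Python) =====
-- def _clean_pg_dump_output(raw_output):
--     """Remove comments, collapse blank lines, and sort INSERTs for deterministic output."""
--     lines = [l for l in raw_output.splitlines() if not l.startswith("--")]
--     # collapse runs of blank lines: keep the first blank of each run, drop a leading run
--     collapsed = []
--     i = 0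
--     first_group = True
--     while i < len(lines):
--         blank = not lines[i].strip()
--         j = i
--         while j < len(lines) and (not lines[j].strip()) == blank:
--             j += 1
--         if blank:
--             if not first_group:
--                 collapsed.append(lines[i])
--         else:
--             collapsed.extend(lines[i:j])
--         first_group = False
--         i = j
--     inserts = sorted(l for l in collapsed if l.startswith("INSERT INTO"))
--     before, after, seen = [], [], False
--     for l in collapsed:
--         if l.startswith("INSERT INTO"):
--             seen = True
--         elif seen:
--             after.append(l)
--         else:
--             before.append(l)
--     return "\n".join(before + inserts + after)
-- ===== Notes on version B (the rewrite author's own statement) =====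
-- stated objective: alternative
-- what changed: Replaces A's index-based comprehension (each line consults lines[i-1]) and in-place INSERT splice by a run-grouping while-loop over maximal blank/nonblank runs plus a single before/after bucket routing pass with the sorted INSERT block joined between the buckets.
import Mathlib
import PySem

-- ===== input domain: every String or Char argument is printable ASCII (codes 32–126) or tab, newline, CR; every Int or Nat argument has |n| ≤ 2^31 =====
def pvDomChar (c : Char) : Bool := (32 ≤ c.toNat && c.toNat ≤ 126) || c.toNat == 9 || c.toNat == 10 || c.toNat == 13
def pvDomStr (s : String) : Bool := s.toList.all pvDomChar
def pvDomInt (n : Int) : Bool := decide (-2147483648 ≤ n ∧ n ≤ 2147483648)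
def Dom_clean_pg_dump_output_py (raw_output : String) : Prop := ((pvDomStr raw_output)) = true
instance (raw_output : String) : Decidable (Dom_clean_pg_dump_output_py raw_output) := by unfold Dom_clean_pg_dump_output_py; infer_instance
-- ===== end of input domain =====

-- B replaces A's index-based blank-collapse comprehension and in-place INSERT splice by a
-- run-grouping pass plus a before/after bucket routing; objective: alternative decomposition.

-- ===== PORT A =====
-- shared tiny predicates: "line.strip() is empty" and "line.startswith('INSERT INTO')"
def pvBlank (line : String) : Bool := PySem.Str.strip line == ""
def pvIns (line : String) : Bool := PySem.Str.startswith line "INSERT INTO"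

-- A's loop body: place the sorted INSERT block at the first INSERT, drop other INSERTs
def pvStepA (ins : List String) (st : List String × Bool) (line : String) : List String × Bool :=
  if pvIns line then (if !st.2 then (st.1 ++ ins, true) else st)
  else (st.1 ++ [line], st.2)

def clean_pg_dump_output_py (raw_output : String) : String :=
  let lines := (PySem.Str.splitlines raw_output).filter (fun line => !PySem.Str.startswith line "--")
  -- lines[i-1]: guarded by 0 < i (and i < len(lines)), so pyGet? is always some; .getD "" is never used
  let collapsed := ((PySem.List.enumerate lines).filter (fun p =>
      !pvBlank p.2 || (decide (0 < p.1) && !pvBlank ((PySem.List.pyGet? lines (p.1 - 1)).getD "")))).map (fun p => p.2)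
  let insert_lines := PySem.List.sorted (collapsed.filter (fun line => pvIns line)) (fun line => line)
  let result := collapsed.foldl (pvStepA insert_lines) ([], false)
  PySem.Str.join "\n" result.1

-- ===== PORT B =====
-- Source B's while-loop over maximal runs of equal blankness: keep a blank run's first line
-- (dropping a leading blank run), keep nonblank runs whole
def pvCollapseB (firstGroup : Bool) (l : List String) : List String :=
  match l with
  | [] => []
  | h :: t =>
    let blank := pvBlank h
    let run := t.takeWhile (fun x => pvBlank x == blank)
    let rest := t.dropWhile (fun x => pvBlank x == blank)
    (if blank then (if firstGroup then [] else [h]) else h :: run) ++ pvCollapseB false rest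
termination_by l.length
decreasing_by
  have := List.length_dropWhile_le (fun x => pvBlank x == pvBlank h) t
  simp; omega

-- Source B's routing loop: bucket each non-INSERT line before/after the first INSERT
def pvStepB (st : List String × List String × Bool) (l : String) : List String × List String × Bool :=
  if pvIns l then (st.1, st.2.1, true)
  else if st.2.2 then (st.1, st.2.1 ++ [l], st.2.2)
  else (st.1 ++ [l], st.2.1, st.2.2)

def clean_pg_dump_output_py_alt (raw_output : String) : String :=
  let lines := (PySem.Str.splitlines raw_output).filter (fun l => !PySem.Str.startswith l "--")
  let collapsed := pvCollapseB true lines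
  let inserts := PySem.List.sorted (collapsed.filter (fun l => pvIns l)) (fun l => l)
  let st := collapsed.foldl pvStepB ([], [], false)
  PySem.Str.join "\n" (st.1 ++ inserts ++ st.2.1)

-- ===== PRECONDITION & SPEC =====
def Spec_clean_pg_dump_output_py (raw_output : String) (out : String) : Prop := out = clean_pg_dump_output_py_alt raw_output
instance (raw_output : String) (out : String) : Decidable (Spec_clean_pg_dump_output_py raw_output out) := by unfold Spec_clean_pg_dump_output_py; infer_instance

-- ===== CLAIM (what is proved, stated in full; the proofs are below) =====
def Claim_equal_clean_pg_dump_output_py : Prop := ∀ (raw_output : String), Dom_clean_pg_dump_output_py raw_output → Spec_clean_pg_dump_output_py raw_output (clean_pg_dump_output_py raw_output)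

-- ===== LEMMAS AND PROOFS =====

-- canonical collapse: keep a line iff it is nonblank or the previous line (flag p) was nonblank
def pvQ (p : Bool) : List String → List String
  | [] => []
  | h :: t => (if !pvBlank h || p then [h] else []) ++ pvQ (!pvBlank h) t

-- A's enumerate/filter comprehension computes pvQ (flag = last line of the prefix is nonblank)
lemma lemA (pre suf : List String) :
    ((PySem.List.enumerate suf (pre.length : Int)).filter (fun p =>
        !pvBlank p.2 || (decide (0 < p.1) && !pvBlank ((PySem.List.pyGet? (pre ++ suf) (p.1 - 1)).getD "")))).map (fun p => p.2)
    = pvQ (pre.getLast?.elim false (fun q => !pvBlank q)) suf := by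
  induction suf generalizing pre with
  | nil => simp [PySem.List.enumerate_nil, pvQ]
  | cons h t ih =>
    rw [PySem.List.enumerate_cons, List.filter_cons]
    have hc : (!pvBlank h || (decide (0 < (pre.length : Int)) &&
        !pvBlank ((PySem.List.pyGet? (pre ++ h :: t) ((pre.length : Int) - 1)).getD "")))
        = (!pvBlank h || pre.getLast?.elim false (fun q => !pvBlank q)) := by
      rcases List.eq_nil_or_concat pre with rfl | ⟨ps, q, rfl⟩
      · simp
      · simp
    have htail : ((PySem.List.enumerate t ((pre.length : Int) + 1)).filter (fun p =>
        !pvBlank p.2 || (decide (0 < p.1) &&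
          !pvBlank ((PySem.List.pyGet? (pre ++ h :: t) (p.1 - 1)).getD "")))).map (fun p => p.2)
        = pvQ (!pvBlank h) t := by
      have e1 : pre ++ h :: t = (pre ++ [h]) ++ t := by simp
      have e2 : (pre.length : Int) + 1 = ((pre ++ [h]).length : Int) := by simp
      rw [e1, e2, ih (pre ++ [h])]
      simp
    rw [hc]
    cases hcase : (!pvBlank h || pre.getLast?.elim false (fun q => !pvBlank q)) with
    | true =>
      simp only [hcase, if_true, List.map_cons, htail, pvQ, List.singleton_append]
    | false =>
      simp only [hcase, Bool.false_eq_true, if_false, htail, pvQ, List.nil_append]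

-- pvQ run lemmas
lemma pvQ_nonblank_run (run rest : List String) (h : ∀ x ∈ run, pvBlank x = false) :
    pvQ true (run ++ rest) = run ++ pvQ true rest := by
  induction run with
  | nil => simp
  | cons x xs ih =>
    have hx := h x (by simp)
    simp only [List.cons_append, pvQ, hx, Bool.not_false, Bool.true_or, if_pos]
    simp [ih (fun y hy => h y (by simp [hy]))]

lemma pvQ_blank_run (run rest : List String) (h : ∀ x ∈ run, pvBlank x = true) :
    pvQ false (run ++ rest) = pvQ false rest := by
  induction run with
  | nil => simp
  | cons x xs ih =>
    have hx := h x (by simp)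
    simp only [List.cons_append, pvQ, hx, Bool.not_true, Bool.or_self, Bool.false_eq_true,
      if_false, List.nil_append]
    exact ih (fun y hy => h y (by simp [hy]))

lemma pvQ_false_eq_true_of_head (rest : List String)
    (h : rest = [] ∨ ∃ h' t', rest = h' :: t' ∧ pvBlank h' = false) :
    pvQ false rest = pvQ true rest := by
  rcases h with rfl | ⟨h', t', rfl, hh⟩
  · rfl
  · simp [pvQ, hh]

-- B's run-grouping collapse computes pvQ with the negated flag
lemma lemB (l : List String) (b : Bool) : pvCollapseB b l = pvQ (!b) l := by
  induction hn : l.length using Nat.strong_induction_on generalizing l b with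
  | _ n ihn =>
  subst hn
  match l with
  | [] => simp [pvCollapseB, pvQ]
  | h :: t =>
    have hlen : ∀ (p : String → Bool), (t.dropWhile p).length < (h :: t).length := by
      intro p
      have := List.length_dropWhile_le p t
      simp; omega
    cases hb : pvBlank h with
    | true =>
      rw [pvCollapseB]
      simp only [hb, if_true]
      have hsplit : t = t.takeWhile (fun x => pvBlank x == true)
          ++ t.dropWhile (fun x => pvBlank x == true) := (List.takeWhile_append_dropWhile).symm
      have hrun : ∀ x ∈ t.takeWhile (fun x => pvBlank x == true), pvBlank x = true := by
        intro x hx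
        simpa using List.mem_takeWhile_imp hx
      have hhead : t.dropWhile (fun x => pvBlank x == true) = [] ∨
          ∃ h' t', t.dropWhile (fun x => pvBlank x == true) = h' :: t' ∧ pvBlank h' = false := by
        cases hd : t.dropWhile (fun x => pvBlank x == true) with
        | nil => exact Or.inl rfl
        | cons h' t' =>
          refine Or.inr ⟨h', t', rfl, ?_⟩
          have := List.head_dropWhile_not (fun x => pvBlank x == true) (l := t)
            (w := by rw [hd]; simp)
          simp only [hd, List.head_cons] at this
          simpa using this
      conv_rhs => rw [pvQ]
      rw [hb]
      conv_rhs => rw [hsplit]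
      simp only [Bool.not_true, Bool.false_or]
      rw [pvQ_blank_run _ _ hrun, pvQ_false_eq_true_of_head _ hhead,
        ihn _ (hlen _) _ false rfl]
      cases b <;> simp
    | false =>
      rw [pvCollapseB]
      simp only [hb, Bool.false_eq_true, if_false]
      have hsplit : t = t.takeWhile (fun x => pvBlank x == false)
          ++ t.dropWhile (fun x => pvBlank x == false) := (List.takeWhile_append_dropWhile).symm
      have hrun : ∀ x ∈ t.takeWhile (fun x => pvBlank x == false), pvBlank x = false := by
        intro x hx
        simpa using List.mem_takeWhile_imp hx
      conv_rhs => rw [pvQ]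
      rw [hb]
      conv_rhs => rw [hsplit]
      simp only [Bool.not_false, Bool.true_or]
      rw [pvQ_nonblank_run _ _ hrun, ihn _ (hlen _) _ false rfl]
      simp

-- routing: the common shape both loops compute
def pvFilterNI (l : List String) : List String := l.filter (fun x => !pvIns x)

def pvSplit : List String → List String × List String
  | [] => ([], [])
  | h :: t => if pvIns h then ([], pvFilterNI t) else
      let s := pvSplit t
      (h :: s.1, s.2)

lemma foldA_true (ins : List String) (l : List String) (r : List String) :
    l.foldl (pvStepA ins) (r, true) = (r ++ pvFilterNI l, true) := by
  induction l generalizing r with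
  | nil => simp [pvFilterNI]
  | cons h t ih =>
    by_cases hi : pvIns h <;>
      simp [List.foldl_cons, pvStepA, hi, ih, pvFilterNI]

lemma foldA_false (ins : List String) (l : List String) (r : List String) :
    l.foldl (pvStepA ins) (r, false) =
      if l.any pvIns then (r ++ (pvSplit l).1 ++ ins ++ (pvSplit l).2, true) else (r ++ l, false) := by
  induction l generalizing r with
  | nil => simp
  | cons h t ih =>
    by_cases hi : pvIns h
    · simp [List.foldl_cons, pvStepA, hi, foldA_true, pvSplit]
    · simp only [List.foldl_cons, pvStepA, hi, Bool.false_eq_true, if_false, ih]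
      by_cases ha : t.any pvIns <;> simp [ha, hi, pvSplit]

lemma foldB_true (l : List String) (b a : List String) :
    l.foldl pvStepB (b, a, true) = (b, a ++ pvFilterNI l, true) := by
  induction l generalizing a with
  | nil => simp [pvFilterNI]
  | cons h t ih =>
    by_cases hi : pvIns h <;>
      simp [List.foldl_cons, pvStepB, hi, ih, pvFilterNI]

lemma foldB_false (l : List String) (b a : List String) :
    l.foldl pvStepB (b, a, false) =
      if l.any pvIns then (b ++ (pvSplit l).1, a ++ (pvSplit l).2, true) else (b ++ l, a, false) := by
  induction l generalizing b with
  | nil => simp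
  | cons h t ih =>
    by_cases hi : pvIns h
    · simp [List.foldl_cons, pvStepB, hi, foldB_true, pvSplit]
    · simp only [List.foldl_cons, pvStepB, hi, Bool.false_eq_true, if_false, ih]
      by_cases ha : t.any pvIns <;> simp [ha, hi, pvSplit]

-- ===== VERDICT (by name: the statement is the Claim_ definition above) =====
theorem clean_pg_dump_output_py_spec : Claim_equal_clean_pg_dump_output_py := by
  intro raw_output _
  unfold Spec_clean_pg_dump_output_py
  simp only [clean_pg_dump_output_py, clean_pg_dump_output_py_alt]
  set L := (PySem.Str.splitlines raw_output).filter (fun l => !PySem.Str.startswith l "--") with hL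
  have hcol : ((PySem.List.enumerate L).filter (fun p =>
      !pvBlank p.2 || (decide (0 < p.1) &&
        !pvBlank ((PySem.List.pyGet? L (p.1 - 1)).getD "")))).map (fun p => p.2)
      = pvCollapseB true L := by
    have := lemA [] L
    simp only [List.nil_append, List.length_nil, Nat.cast_zero, List.getLast?_nil,
      Option.elim_none] at this
    rw [this, lemB]
    rfl
  rw [hcol]
  set C := pvCollapseB true L with hC
  set ins := PySem.List.sorted (C.filter (fun l => pvIns l)) (fun l => l) with hins
  by_cases hA : C.any pvIns
  · rw [foldA_false, foldB_false]
    simp [hA]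
  · rw [foldA_false, foldB_false]
    have hfil : C.filter (fun l => pvIns l) = [] := by
      rw [List.filter_eq_nil_iff]
      intro x hx
      simp only [List.any_eq_true, not_exists, not_and] at hA
      simp [hA x hx]
    have : ins = [] := by rw [hins, hfil]; rfl
    simp [hA, this]
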